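-- pv_equiv track=rewrite | github.com/hchiam/cogLang-geneticAlgo | geneticAlgo_just1.py | justTwoInitSylls_CVC
-- ===== SOURCE A (Python) =====
-- def justTwoInitSylls_CVC(word):
--     beforeThisIndex = 0
--     afterThisIndex = 0
--     for vowel1 in word:
--         if vowel1 in 'aeiou':
--             afterThisIndex = word.index(vowel1)
--             break
--     for vowel2 in word[afterThisIndex+1:]:
--         if vowel2 in 'aeiou':
--             beforeThisIndex = word[afterThisIndex+1:].index(vowel2)+1 + afterThisIndex+1
--             # if second syllable has two vowels, then ignore that final vowel to preserve two vowels/syllables per word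
--             if beforeThisIndex < len(word) and word[beforeThisIndex] in 'aeiou':
--                 beforeThisIndex -= 1
--             break
--     if beforeThisIndex!=0:
--         word = word[:beforeThisIndex+1]
--     return word
-- ===== SOURCE B (Python) =====
-- def justTwoInitSylls_CVC(word):
--     vowels = "aeiou"
--     positions = [i for i, ch in enumerate(word) if ch in vowels]
--     if len(positions) < 2:
--         return word
--     p2 = positions[1]
--     end = p2 + 2 if p2 + 1 < len(word) and word[p2 + 1] not in vowels else p2 + 1
--     return word[:end]
-- ===== Notes on version B (the rewrite author's own statement) =====
-- stated objective: simpler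
-- what changed: Replaces A's two sequential break-loops with redundant word.index/slice.index rescans and index mutation by one comprehension collecting vowel positions, then a closed-form cut point from the second position.
import Mathlib
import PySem

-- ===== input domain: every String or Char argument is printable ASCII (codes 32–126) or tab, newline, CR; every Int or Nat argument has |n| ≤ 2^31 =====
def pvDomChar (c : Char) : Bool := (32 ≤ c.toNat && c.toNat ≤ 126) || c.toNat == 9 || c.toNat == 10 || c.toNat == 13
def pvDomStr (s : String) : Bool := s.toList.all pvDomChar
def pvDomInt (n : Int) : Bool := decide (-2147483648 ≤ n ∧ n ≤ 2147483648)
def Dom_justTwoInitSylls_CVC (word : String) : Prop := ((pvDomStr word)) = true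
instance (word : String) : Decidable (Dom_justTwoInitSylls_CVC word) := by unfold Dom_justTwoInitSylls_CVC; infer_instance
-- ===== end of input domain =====

-- B replaces A's two break-loops with .index rescans by one vowel-position comprehension and a closed-form cut (simpler; same return value).

-- ===== PORT A =====
def pvVows : List Char := ['a', 'e', 'i', 'o', 'u']

-- first for-loop: for vowel1 in word: if vowel1 in 'aeiou': afterThisIndex = word.index(vowel1); break
def pvLoopA1 : List Char → List Char → Int
  | [], _ => 0
  | c :: rest, u =>
    if PySem.Chars.isIn [c] pvVows then PySem.Chars.find u [c] else pvLoopA1 rest u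

-- second for-loop over word[afterThisIndex+1:]
def pvLoopA2 : List Char → List Char → Int → Int
  | [], _, _ => 0
  | c :: rest, u, after =>
    if PySem.Chars.isIn [c] pvVows then
      let t := PySem.List.slice u (some (after + 1)) none
      let b := PySem.Chars.find t [c] + 1 + after + 1
      if decide (b < (u.length : Int)) && PySem.Chars.isIn [PySem.List.pyGetD u b ' '] pvVows then
        b - 1
      else b
    else pvLoopA2 rest u after

def justTwoInitSylls_CVC (word : String) : String :=
  let u := word.toList
  let after := pvLoopA1 u u
  let before := pvLoopA2 (PySem.List.slice u (some (after + 1)) none) u after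
  if before ≠ 0 then String.ofList (PySem.List.slice u none (some (before + 1)))
  else word

-- ===== PORT B =====
def justTwoInitSylls_CVC_alt (word : String) : String :=
  let u := word.toList
  let positions :=
    ((PySem.List.enumerate u 0).filter (fun p => PySem.Chars.isIn [p.2] pvVows)).map (·.1)
  if positions.length < 2 then word
  else
    let p2 := PySem.List.pyGetD positions 1 0
    let e :=
      if decide (p2 + 1 < (u.length : Int)) && !(PySem.Chars.isIn [PySem.List.pyGetD u (p2 + 1) ' '] pvVows) then
        p2 + 2
      else p2 + 1
    String.ofList (PySem.List.slice u none (some e))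

-- ===== PRECONDITION & SPEC =====
def Spec_justTwoInitSylls_CVC (word : String) (out : String) : Prop := out = justTwoInitSylls_CVC_alt word
instance (word : String) (out : String) : Decidable (Spec_justTwoInitSylls_CVC word out) := by unfold Spec_justTwoInitSylls_CVC; infer_instance

-- ===== CLAIM (what is proved, stated in full; the proofs are below) =====
def Claim_equal_justTwoInitSylls_CVC : Prop := ∀ (word : String), Dom_justTwoInitSylls_CVC word → Spec_justTwoInitSylls_CVC word (justTwoInitSylls_CVC word)

-- ===== LEMMAS AND PROOFS =====

-- find points at the first occurrence of c when everything before it avoids c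
theorem pv_find_first (a s : List Char) (c : Char) (h : c ∉ a) :
    PySem.Chars.find (a ++ c :: s) [c] = (a.length : Int) := by
  have hinf : [c] <:+: (a ++ c :: s) := (List.singleton_infix_iff c _).mpr (by simp)
  have h0 : 0 ≤ PySem.Chars.find (a ++ c :: s) [c] := (PySem.Chars.find_nonneg_iff _ _).mpr hinf
  obtain ⟨hpre, hmin⟩ := PySem.Chars.find_spec (s := a ++ c :: s) (sub := [c]) h0
  set f := PySem.Chars.find (a ++ c :: s) [c] with hf
  have hle : f.toNat ≤ a.length := by
    by_contra hgt
    exact hmin a.length (by omega) ⟨s, by simp⟩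
  have hnlt : ¬ f.toNat < a.length := by
    intro hlt
    obtain ⟨t, ht⟩ := hpre
    have hg : (a ++ c :: s)[f.toNat]? = some c := by
      have h0' : ((a ++ c :: s).drop f.toNat)[0]? = some c := by rw [← ht]; rfl
      simpa [List.getElem?_drop] using h0'
    have hc : a[f.toNat]? = some c := by
      rwa [List.getElem?_append_left (by omega)] at hg
    exact h (List.mem_of_getElem? hc)
  omega

-- every list is vowel-free, or splits at its first vowel
theorem pv_split (u : List Char) :
    (∀ c ∈ u, PySem.Chars.isIn [c] pvVows = false) ∨
    ∃ a c r, u = a ++ c :: r ∧ (∀ x ∈ a, PySem.Chars.isIn [x] pvVows = false) ∧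
      PySem.Chars.isIn [c] pvVows = true := by
  induction u with
  | nil => exact Or.inl (by simp)
  | cons x xs ih =>
    by_cases hx : PySem.Chars.isIn [x] pvVows = true
    · exact Or.inr ⟨[], x, xs, by simp, by simp, hx⟩
    · rcases ih with hfree | ⟨a, c, r, rfl, ha, hc⟩
      · exact Or.inl (by
          intro c hc
          rcases List.mem_cons.mp hc with rfl | hmem
          · simpa using hx
          · exact hfree c hmem)
      · exact Or.inr ⟨x :: a, c, r, rfl, by
          intro y hy
          rcases List.mem_cons.mp hy with rfl | hmem
          · simpa using hx
          · exact ha y hmem, hc⟩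

theorem pv_notMem_of_free {a : List Char} {c : Char}
    (ha : ∀ x ∈ a, PySem.Chars.isIn [x] pvVows = false)
    (hc : PySem.Chars.isIn [c] pvVows = true) : c ∉ a := by
  intro hmem
  rw [ha c hmem] at hc
  exact Bool.false_ne_true hc

theorem pv_loopA1_free (l u : List Char) (h : ∀ c ∈ l, PySem.Chars.isIn [c] pvVows = false) :
    pvLoopA1 l u = 0 := by
  induction l with
  | nil => rfl
  | cons x xs ih =>
    rw [pvLoopA1, if_neg (by simp [h x (List.mem_cons_self)])]
    exact ih (fun c hc => h c (List.mem_cons_of_mem _ hc))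

theorem pv_loopA1_hit (a r : List Char) (c : Char) (u : List Char)
    (ha : ∀ x ∈ a, PySem.Chars.isIn [x] pvVows = false)
    (hc : PySem.Chars.isIn [c] pvVows = true) :
    pvLoopA1 (a ++ c :: r) u = PySem.Chars.find u [c] := by
  induction a with
  | nil => rw [List.nil_append, pvLoopA1, if_pos hc]
  | cons x xs ih =>
    rw [List.cons_append, pvLoopA1, if_neg (by simp [ha x (List.mem_cons_self)])]
    exact ih (fun y hy => ha y (List.mem_cons_of_mem _ hy))

theorem pv_loopA2_free (l u : List Char) (after : Int)
    (h : ∀ c ∈ l, PySem.Chars.isIn [c] pvVows = false) :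
    pvLoopA2 l u after = 0 := by
  induction l with
  | nil => rfl
  | cons x xs ih =>
    rw [pvLoopA2, if_neg (by simp [h x (List.mem_cons_self)])]
    exact ih (fun c hc => h c (List.mem_cons_of_mem _ hc))

theorem pv_loopA2_hit (b r : List Char) (c : Char) (u : List Char) (after : Int)
    (hb : ∀ x ∈ b, PySem.Chars.isIn [x] pvVows = false)
    (hc : PySem.Chars.isIn [c] pvVows = true) :
    pvLoopA2 (b ++ c :: r) u after =
      (let t := PySem.List.slice u (some (after + 1)) none
       let bi := PySem.Chars.find t [c] + 1 + after + 1
       if decide (bi < (u.length : Int)) && PySem.Chars.isIn [PySem.List.pyGetD u bi ' '] pvVows then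
         bi - 1
       else bi) := by
  induction b with
  | nil => rw [List.nil_append, pvLoopA2, if_pos hc]
  | cons x xs ih =>
    rw [List.cons_append, pvLoopA2, if_neg (by simp [hb x (List.mem_cons_self)])]
    exact ih (fun y hy => hb y (List.mem_cons_of_mem _ hy))

-- B side: filtering the enumeration of a vowel-free prefix skips it entirely
theorem pv_filter_enum_append (a l : List Char) (s : Int)
    (ha : ∀ x ∈ a, PySem.Chars.isIn [x] pvVows = false) :
    (PySem.List.enumerate (a ++ l) s).filter (fun p => PySem.Chars.isIn [p.2] pvVows) =
    (PySem.List.enumerate l (s + a.length)).filter (fun p => PySem.Chars.isIn [p.2] pvVows) := by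
  induction a generalizing s with
  | nil => simp
  | cons x xs ih =>
    rw [List.cons_append, PySem.List.enumerate_cons,
      List.filter_cons_of_neg (by simp [ha x (List.mem_cons_self)]),
      ih (s + 1) (fun y hy => ha y (List.mem_cons_of_mem _ hy))]
    congr 2
    push_cast [List.length_cons]
    omega

theorem pv_filter_enum_free (l : List Char) (s : Int)
    (h : ∀ c ∈ l, PySem.Chars.isIn [c] pvVows = false) :
    (PySem.List.enumerate l s).filter (fun p => PySem.Chars.isIn [p.2] pvVows) = [] := by
  induction l generalizing s with
  | nil => rfl
  | cons x xs ih =>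
    rw [PySem.List.enumerate_cons, List.filter_cons_of_neg (by simp [h x (List.mem_cons_self)])]
    exact ih (s + 1) (fun c hc => h c (List.mem_cons_of_mem _ hc))

-- ===== VERDICT (by name: the statement is the Claim_ definition above) =====
theorem justTwoInitSylls_CVC_spec : Claim_equal_justTwoInitSylls_CVC := by
  intro word _
  simp only [Spec_justTwoInitSylls_CVC, justTwoInitSylls_CVC, justTwoInitSylls_CVC_alt]
  set u := word.toList with hu
  rcases pv_split u with hfree | ⟨a, c1, r, hsplit, ha, hc1⟩
  · -- no vowels at all: both return word
    have h1 : pvLoopA1 u u = 0 := pv_loopA1_free u u hfree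
    have hdrop : PySem.List.slice u (some ((0 : Int) + 1)) none = u.drop 1 := by
      simpa using PySem.List.slice_from_natCast u 1
    have h2 : pvLoopA2 (u.drop 1) u 0 = 0 :=
      pv_loopA2_free _ u 0 (fun c hc => hfree c (List.mem_of_mem_drop hc))
    rw [h1, hdrop, h2, if_neg (by simp)]
    rw [pv_filter_enum_free u 0 hfree]
    simp
  · rcases pv_split r with hrfree | ⟨b, c2, r2, hsplit2, hb, hc2⟩
    · -- exactly one vowel: both return word
      have h1 : pvLoopA1 u u = (a.length : Int) := by
        rw [hsplit, pv_loopA1_hit a r c1 _ ha hc1,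
          pv_find_first a r c1 (pv_notMem_of_free ha hc1)]
      have hdrop : PySem.List.slice u (some ((a.length : Int) + 1)) none = r := by
        have : ((a.length : Int) + 1) = ((a.length + 1 : Nat) : Int) := by push_cast; ring
        rw [this, PySem.List.slice_from_natCast, hsplit]
        simp
      have h2 : pvLoopA2 r u (a.length : Int) = 0 := pv_loopA2_free r u _ hrfree
      rw [h1, hdrop, h2, if_neg (by simp)]
      rw [hsplit, pv_filter_enum_append a (c1 :: r) 0 ha, PySem.List.enumerate_cons,
        List.filter_cons_of_pos (by simpa using hc1), pv_filter_enum_free r _ hrfree]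
      simp
    · -- at least two vowels
      subst hsplit2
      have hc1a : c1 ∉ a := pv_notMem_of_free ha hc1
      have hc2b : c2 ∉ b := pv_notMem_of_free hb hc2
      have h1 : pvLoopA1 u u = (a.length : Int) := by
        rw [hsplit, pv_loopA1_hit a _ c1 _ ha hc1, pv_find_first a _ c1 hc1a]
      have hdrop : PySem.List.slice u (some ((a.length : Int) + 1)) none = b ++ c2 :: r2 := by
        have : ((a.length : Int) + 1) = ((a.length + 1 : Nat) : Int) := by push_cast; ring
        rw [this, PySem.List.slice_from_natCast, hsplit]
        simp
      have hfind2 : PySem.Chars.find (b ++ c2 :: r2) [c2] = (b.length : Int) :=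
        pv_find_first b r2 c2 hc2b
      -- the second vowel's absolute position
      set p2 : Nat := a.length + 1 + b.length with hp2
      have hlen : u.length = p2 + 1 + r2.length := by rw [hsplit]; simp [hp2]; omega
      have h2 : pvLoopA2 (b ++ c2 :: r2) u (a.length : Int) =
          (if decide (((p2 : Int) + 1) < (u.length : Int)) &&
              PySem.Chars.isIn [PySem.List.pyGetD u ((p2 : Int) + 1) ' '] pvVows then
            ((p2 : Int) + 1) - 1
          else ((p2 : Int) + 1)) := by
        rw [pv_loopA2_hit b r2 c2 u _ hb hc2]
        simp only [hdrop, hfind2]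
        have harith : (b.length : Int) + 1 + (a.length : Int) + 1 = (p2 : Int) + 1 := by
          push_cast [hp2]; ring
        rw [harith]
      -- B's positions list
      have hpos : ((PySem.List.enumerate u 0).filter (fun p => PySem.Chars.isIn [p.2] pvVows)).map (·.1) =
          (a.length : Int) :: (p2 : Int) ::
            ((PySem.List.enumerate r2 ((p2 : Int) + 1)).filter (fun p => PySem.Chars.isIn [p.2] pvVows)).map (·.1) := by
        rw [hsplit, pv_filter_enum_append a _ 0 ha, PySem.List.enumerate_cons,
          List.filter_cons_of_pos (by simpa using hc1),
          pv_filter_enum_append b _ _ hb, PySem.List.enumerate_cons,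
          List.filter_cons_of_pos (by simpa using hc2)]
        have e1 : (0 : Int) + (a.length : Int) + 1 + (b.length : Int) = (p2 : Int) := by
          push_cast [hp2]; ring
        simp only [List.map_cons]
        rw [e1]
        simp
      set X := ((PySem.List.enumerate r2 ((p2 : Int) + 1)).filter (fun p => PySem.Chars.isIn [p.2] pvVows)).map (·.1) with hX
      rw [h1, hdrop, h2, hpos,
        if_neg (show ¬(((a.length : Int) :: (p2 : Int) :: X).length < 2) by simp)]
      have hg2 : PySem.List.pyGetD ((a.length : Int) :: (p2 : Int) :: X) 1 0 = (p2 : Int) := by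
        simp [PySem.List.pyGetD]
      rw [hg2]
      rcases r2 with _ | ⟨rc, rr⟩
      · -- second vowel is the last character: both take the whole word
        have hdec : decide ((p2 : Int) + 1 < (u.length : Int)) = false := by
          apply decide_eq_false
          rw [hlen]; simp only [List.length_nil]; push_cast; omega
        simp only [hdec, Bool.false_and, Bool.false_eq_true, if_false]
        rw [if_pos (show ((p2 : Int) + 1) ≠ 0 by positivity)]
        have e1 : (p2 : Int) + 1 + 1 = ((p2 + 2 : Nat) : Int) := by push_cast; ring
        have e2 : (p2 : Int) + 1 = ((p2 + 1 : Nat) : Int) := by push_cast; ring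
        rw [e1, e2, PySem.List.slice_to_natCast, PySem.List.slice_to_natCast,
          List.take_of_length_le (by rw [hlen]; simp only [List.length_nil]; omega),
          List.take_of_length_le (by rw [hlen]; simp only [List.length_nil]; omega)]
      · -- a character follows the second vowel: cut after it iff it is a consonant
        have hdec : decide ((p2 : Int) + 1 < (u.length : Int)) = true := by
          apply decide_eq_true
          rw [hlen]; simp only [List.length_cons]; push_cast; omega
        have hget : PySem.List.pyGetD u ((p2 : Int) + 1) ' ' = rc := by
          have e : ((p2 : Int) + 1) = ((p2 + 1 : Nat) : Int) := by push_cast; ring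
          rw [e, PySem.List.pyGetD_natCast, hsplit]
          have e2 : p2 + 1 = (a ++ c1 :: b).length + 1 := by
            rw [hp2]; simp only [List.length_append, List.length_cons]; omega
          rw [List.getD_eq_getElem?_getD, e2, ← List.cons_append, ← List.append_assoc,
            List.getElem?_append_right (by omega)]
          simp
        simp only [hdec, hget, Bool.true_and]
        by_cases hv : PySem.Chars.isIn [rc] pvVows = true
        · rw [if_pos hv,
            if_neg (show ¬((!PySem.Chars.isIn [rc] pvVows) = true) by simp [hv]),
            if_pos (show ((p2 : Int) + 1 - 1) ≠ 0 by rw [hp2]; push_cast; omega)]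
          have e3 : (p2 : Int) + 1 - 1 + 1 = (p2 : Int) + 1 := by ring
          rw [e3]
        · rw [Bool.not_eq_true] at hv
          rw [if_neg (show ¬(PySem.Chars.isIn [rc] pvVows = true) by simp [hv]),
            if_pos (show (!PySem.Chars.isIn [rc] pvVows) = true by simp [hv]),
            if_pos (show ((p2 : Int) + 1) ≠ 0 by positivity)]
          have e3 : (p2 : Int) + 1 + 1 = (p2 : Int) + 2 := by ring
          rw [e3]
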